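-- pv_equiv track=rewrite | github.com/FilipOsowski/Java-Site | solution_checker.py | get_first_error
-- ===== SOURCE A (Python) =====
-- def get_first_error(output):
--     error_text = []
--     error_start = False
--     for line in output:
--         if "|  Error:" in line:
--             error_start = not error_start
--
--         if error_start:
--             error_text.append(line)
--
--     return error_text
-- ===== SOURCE B (Python) =====
-- def get_first_error(output):
--     error_text = []
--     it = iter(output)
--     for line in it:
--         if "|  Error:" in line:
--             error_text.append(line)
--             for inner in it:
--                 if "|  Error:" in inner:
--                     break
--                 error_text.append(inner)
--     return error_text
-- ===== Notes on version B (the rewrite author's own statement) =====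
-- stated objective: idiomatic
-- what changed: Replaced the boolean toggle flag with explicit control flow: an outer loop over a shared iterator skips to each opening '| Error:' marker and a nested inner loop collects lines until the closing marker, so no flag state is carried.
import Mathlib
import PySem

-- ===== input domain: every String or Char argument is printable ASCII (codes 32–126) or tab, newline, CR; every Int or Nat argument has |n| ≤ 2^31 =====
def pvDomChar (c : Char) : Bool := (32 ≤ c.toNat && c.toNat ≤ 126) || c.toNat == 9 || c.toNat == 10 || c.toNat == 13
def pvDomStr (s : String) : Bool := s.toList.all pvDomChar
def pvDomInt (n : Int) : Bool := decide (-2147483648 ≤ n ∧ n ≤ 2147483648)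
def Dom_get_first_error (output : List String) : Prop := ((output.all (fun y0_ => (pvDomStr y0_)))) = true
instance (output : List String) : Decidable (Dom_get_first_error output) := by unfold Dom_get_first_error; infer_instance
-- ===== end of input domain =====

-- B replaces A's boolean toggle flag with explicit control flow (outer skip loop + nested collect loop over one iterator); same cost, no state flag.

-- ===== PORT A =====
-- A: single loop carrying (error_text, error_start); the flag toggles on marker lines before the append.
def get_first_error (output : List String) : List String :=
  (output.foldl
    (fun (st : List String × Bool) line =>
      let error_start := if PySem.Str.isIn "|  Error:" line then !st.2 else st.2
      (if error_start then st.1 ++ [line] else st.1, error_start))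
    ([], false)).1

-- ===== PORT B =====
-- B: outer loop (gfeSkip) advances the iterator to an opening marker; inner loop (gfeCollect)
-- appends lines until the closing marker, then control returns to the outer loop.
mutual
  def gfeSkip : List String → List String
    | [] => []
    | line :: rest =>
      if PySem.Str.isIn "|  Error:" line then line :: gfeCollect rest
      else gfeSkip rest
  def gfeCollect : List String → List String
    | [] => []
    | line :: rest =>
      if PySem.Str.isIn "|  Error:" line then gfeSkip rest
      else line :: gfeCollect rest
end

def get_first_error_alt (output : List String) : List String := gfeSkip output

-- ===== PRECONDITION & SPEC =====
def Spec_get_first_error (output : List String) (out : List String) : Prop := out = get_first_error_alt output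
instance (output : List String) (out : List String) : Decidable (Spec_get_first_error output out) := by unfold Spec_get_first_error; infer_instance

-- ===== CLAIM (what is proved, stated in full; the proofs are below) =====
def Claim_equal_get_first_error : Prop := ∀ (output : List String), Dom_get_first_error output → Spec_get_first_error output (get_first_error output)

-- ===== LEMMAS AND PROOFS =====
lemma gfe_fold_eq (ls : List String) : ∀ (acc : List String) (b : Bool),
    (ls.foldl
      (fun (st : List String × Bool) line =>
        let error_start := if PySem.Str.isIn "|  Error:" line then !st.2 else st.2
        (if error_start then st.1 ++ [line] else st.1, error_start))
      (acc, b)).1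
      = acc ++ (if b then gfeCollect ls else gfeSkip ls) := by
  induction ls with
  | nil => intro acc b; simp [gfeCollect, gfeSkip]
  | cons l rest ih =>
    intro acc b
    by_cases h : PySem.Str.isIn "|  Error:" l = true <;> cases b <;>
      simp only [List.foldl_cons, h, Bool.not_true, Bool.not_false, if_true, if_false,
        Bool.false_eq_true, ih, gfeSkip, gfeCollect] <;>
      simp

-- ===== VERDICT (by name: the statement is the Claim_ definition above) =====
theorem get_first_error_spec : Claim_equal_get_first_error := by
  intro output _
  unfold Spec_get_first_error get_first_error get_first_error_alt
  simpa using gfe_fold_eq output [] false
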